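-- pv_equiv track=rewrite | github.com/vbshubham/LC | maximumRemovals.py | check
-- ===== SOURCE A (Python) =====
-- def check(s, p, removable, k):
--     removed = set(removable[:k])
--     s = [s[i] for i, ch in enumerate(s) if i not in removed]
--     j = 0
--     for ch in p:
--         while j < len(s) and s[j] != ch:
--             j += 1
--         if j == len(s):
--             return False
--         j += 1
--     return True
-- ===== SOURCE B (Python) =====
-- def check(s, p, removable, k):
--     removed = set(removable[:k])
--     pos = {}
--     n = 0
--     for i, ch in enumerate(s):
--         if i in removed:
--             continue
--         pos.setdefault(ch, []).append(n)
--         n += 1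
--     j = -1
--     for ch in p:
--         lst = pos.get(ch)
--         if lst is None:
--             return False
--         lo, hi = 0, len(lst)
--         while lo < hi:
--             mid = (lo + hi) // 2
--             if lst[mid] > j:
--                 hi = mid
--             else:
--                 lo = mid + 1
--         if lo == len(lst):
--             return False
--         j = lst[lo]
--     return True
-- ===== Notes on version B (the rewrite author's own statement) =====
-- stated objective: alternative
-- what changed: B replaces A's filtered-list construction and linear two-pointer scan by a char-to-positions index built in one pass, answering each pattern character with a hand-rolled binary search for the first kept position after the last match.
import Mathlib
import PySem

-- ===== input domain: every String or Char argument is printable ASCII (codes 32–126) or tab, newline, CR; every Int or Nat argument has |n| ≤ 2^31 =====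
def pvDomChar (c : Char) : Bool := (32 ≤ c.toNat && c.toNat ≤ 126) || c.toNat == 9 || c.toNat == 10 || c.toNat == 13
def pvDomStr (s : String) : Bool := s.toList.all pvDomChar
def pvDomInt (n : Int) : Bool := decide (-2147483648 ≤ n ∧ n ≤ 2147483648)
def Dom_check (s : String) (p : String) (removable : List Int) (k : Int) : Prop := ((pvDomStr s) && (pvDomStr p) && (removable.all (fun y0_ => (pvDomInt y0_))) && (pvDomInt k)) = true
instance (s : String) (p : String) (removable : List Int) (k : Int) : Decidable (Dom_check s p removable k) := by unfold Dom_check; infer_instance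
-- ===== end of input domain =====

-- B replaces A's filtered-list + linear two-pointer scan by a char-to-positions index queried
-- with a hand-rolled binary search per pattern character (objective: alternative).

-- ===== PORT A =====
-- the 'while j < len(s) and s[j] != ch: j += 1' loop
def checkScan (t : List Char) (ch : Char) (j : Nat) : Nat :=
  if h : j < t.length then
    if t[j] ≠ ch then checkScan t ch (j + 1) else j
  else j
termination_by t.length - j

-- the 'for ch in p' loop with its early 'return False'
def checkLoop (t : List Char) : List Char → Nat → Bool
  | [], _ => true
  | ch :: rest, j =>
    let j' := checkScan t ch j
    if j' = t.length then false else checkLoop t rest (j' + 1)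

def check (s : String) (p : String) (removable : List Int) (k : Int) : Bool :=
  let removed : PySem.Set Int := PySem.Set.ofList (PySem.List.slice removable none (some k))
  -- [s[i] for i, ch in enumerate(s) if i not in removed]; s[i] with i from enumerate(s) is exactly ch
  let t : List Char := ((PySem.List.enumerate s.toList 0).filter
      (fun ich => !(PySem.Set.contains removed ich.1))).map (·.2)
  checkLoop t p.toList 0

-- ===== PORT B =====
-- the 'while lo < hi' binary-search loop; lst[mid] is in range (lo ≤ mid < hi ≤ len(lst)), so the getD is exact
def bsearch (lst : List Int) (j : Int) (lo hi : Nat) : Nat :=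
  -- mid = (lo + hi) // 2, inlined
  if h : lo < hi then
    if j < lst[(lo + hi) / 2]?.getD 0 then bsearch lst j lo ((lo + hi) / 2)
    else bsearch lst j ((lo + hi) / 2 + 1) hi
  else lo
termination_by hi - lo
decreasing_by all_goals omega

-- the 'for ch in p' loop; lst[lo] is in range (lo ≠ len(lst) is checked), so the getD is exact
def altLoop (pos : PySem.Dict Char (List Int)) : List Char → Int → Bool
  | [], _ => true
  | ch :: rest, j =>
    (pos.get? ch).elim false (fun lst =>
      let lo := bsearch lst j 0 lst.length
      if lo = lst.length then false else altLoop pos rest (lst[lo]?.getD 0))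

def check_alt (s : String) (p : String) (removable : List Int) (k : Int) : Bool :=
  let removed : PySem.Set Int := PySem.Set.ofList (PySem.List.slice removable none (some k))
  -- pos.setdefault(ch, []).append(n): value at key ch extended by [n], key order kept by insert-overwrite
  let st := (PySem.List.enumerate s.toList 0).foldl
    (fun st ich => if PySem.Set.contains removed ich.1 then st
      else (st.1.insert ich.2 (st.1.getD ich.2 [] ++ [st.2]), st.2 + 1))
    ((PySem.Dict.empty : PySem.Dict Char (List Int)), (0 : Int))
  altLoop st.1 p.toList (-1)

-- ===== PRECONDITION & SPEC =====
def Spec_check (s : String) (p : String) (removable : List Int) (k : Int) (out : Bool) : Prop := out = check_alt s p removable k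
instance (s : String) (p : String) (removable : List Int) (k : Int) (out : Bool) : Decidable (Spec_check s p removable k out) := by unfold Spec_check; infer_instance

-- ===== CLAIM (what is proved, stated in full; the proofs are below) =====
def Claim_equal_check : Prop := ∀ (s : String) (p : String) (removable : List Int) (k : Int), Dom_check s p removable k → Spec_check s p removable k (check s p removable k)

-- ===== LEMMAS AND PROOFS =====

-- positions (offset by n) of the occurrences of ch in t
def posOf : List Char → Char → Int → List Int
  | [], _, _ => []
  | c :: t, ch, n => if c = ch then n :: posOf t ch (n + 1) else posOf t ch (n + 1)

theorem posOf_ge (t : List Char) (ch : Char) : ∀ (n : Int), ∀ x ∈ posOf t ch n, n ≤ x := by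
  induction t with
  | nil => intro n x hx; simp [posOf] at hx
  | cons c t ih =>
    intro n x hx
    simp only [posOf] at hx
    split at hx
    · rcases List.mem_cons.mp hx with h | h
      · omega
      · have := ih (n + 1) x h; omega
    · have := ih (n + 1) x hx; omega

theorem posOf_pairwise (t : List Char) (ch : Char) : ∀ (n : Int), (posOf t ch n).Pairwise (· < ·) := by
  induction t with
  | nil => intro n; simp [posOf]
  | cons c t ih =>
    intro n
    simp only [posOf]
    split
    · exact List.Pairwise.cons (fun x hx => by have := posOf_ge t ch (n + 1) x hx; omega) (ih (n + 1))
    · exact ih (n + 1)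

-- skipping removed indices in the index-building fold = folding over the kept characters
theorem foldl_skip (R : PySem.Set Int) (l : List (Int × Char)) :
    ∀ (init : PySem.Dict Char (List Int) × Int),
    l.foldl (fun st ich => if PySem.Set.contains R ich.1 then st
        else (st.1.insert ich.2 (st.1.getD ich.2 [] ++ [st.2]), st.2 + 1)) init
      = ((l.filter (fun ich => !PySem.Set.contains R ich.1)).map (·.2)).foldl
          (fun st c => (st.1.insert c (st.1.getD c [] ++ [st.2]), st.2 + 1)) init := by
  induction l with
  | nil => intro init; rfl
  | cons x l ih =>
    intro init
    simp only [List.foldl_cons, List.filter_cons]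
    by_cases h : PySem.Set.contains R x.1 = true
    · rw [if_pos h]
      have hb : (!PySem.Set.contains R x.1) = false := by rw [h]; rfl
      rw [hb, if_neg (by simp)]
      exact ih init
    · rw [if_neg h]
      have hb : (!PySem.Set.contains R x.1) = true := by
        rw [Bool.not_eq_true']; exact Bool.eq_false_iff.mpr h
      rw [hb, if_pos rfl]
      simp only [List.map_cons, List.foldl_cons]
      exact ih _

-- the dict built by the setdefault/append fold maps ch to all its positions
theorem build_get? (t : List Char) (ch : Char) :
    ∀ (pos : PySem.Dict Char (List Int)) (n : Int),
    ((t.foldl (fun st c => (st.1.insert c (st.1.getD c [] ++ [st.2]), st.2 + 1)) (pos, n)).1).get? ch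
      = if posOf t ch n = [] then pos.get? ch else some (pos.getD ch [] ++ posOf t ch n) := by
  induction t with
  | nil => intro pos n; simp [posOf]
  | cons c t ih =>
    intro pos n
    simp only [List.foldl_cons]
    rw [ih]
    by_cases hc : ch = c
    · subst hc
      rw [PySem.Dict.get?_insert_self, PySem.Dict.getD_insert_self]
      by_cases hnil : posOf t ch (n + 1) = []
      · rw [if_pos hnil]
        simp [posOf, hnil]
      · rw [if_neg hnil]
        simp [posOf, List.append_assoc]
    · simp only [posOf, if_neg (fun h : c = ch => hc h.symm)]
      simp only [PySem.Dict.get?_insert, PySem.Dict.getD_insert, if_neg hc]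

-- the first position greater than j, via the first occurrence of ch in the dropped text
theorem posOf_find? (ch : Char) (j : Int) (u : List Char) :
    ∀ (n : Int),
    (posOf u ch n).find? (fun x => decide (j < x))
      = Option.map (fun (i : Nat) => n + ((j + 1 - n).toNat : Int) + (i : Int))
          ((u.drop (j + 1 - n).toNat).findIdx? (fun c => c == ch)) := by
  induction u with
  | nil => intro n; simp [posOf]
  | cons c u ih =>
    intro n
    by_cases hj : j < n
    · have hd : (j + 1 - n).toNat = 0 := by omega
      have hd' : (j + 1 - (n + 1)).toNat = 0 := by omega
      rw [hd]
      simp only [List.drop_zero]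
      by_cases hc : c = ch
      · have hcc : (c == ch) = true := by simp [hc]
        simp only [posOf, if_pos hc, List.find?_cons, List.findIdx?_cons, hcc,
          decide_eq_true hj]
        simp
      · have hcc : (c == ch) = false := by simp [hc]
        simp only [posOf, if_neg hc, List.findIdx?_cons, hcc]
        rw [ih (n + 1), hd']
        simp only [List.drop_zero]
        cases hfi : u.findIdx? (fun c => c == ch) with
        | none => simp
        | some i => simp; omega
    · -- n ≤ j : the head position (if any) is ≤ j, skip it on both sides
      have hd : (j + 1 - n).toNat = (j + 1 - (n + 1)).toNat + 1 := by omega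
      rw [hd]
      simp only [List.drop_succ_cons]
      by_cases hc : c = ch
      · simp only [posOf, if_pos hc, List.find?_cons,
          decide_eq_false (show ¬ j < n from hj)]
        rw [ih (n + 1)]
        cases hfi : (List.drop (j + 1 - (n + 1)).toNat u).findIdx? (fun c => c == ch) with
        | none => simp
        | some i => simp; omega
      · simp only [posOf, if_neg hc]
        rw [ih (n + 1)]
        cases hfi : (List.drop (j + 1 - (n + 1)).toNat u).findIdx? (fun c => c == ch) with
        | none => simp
        | some i => simp; omega

-- A's while-scan via findIdx? on the dropped text
theorem checkScan_eq (t : List Char) (ch : Char) :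
    ∀ (n start : Nat), t.length - start = n → start ≤ t.length →
    checkScan t ch start = match (t.drop start).findIdx? (fun c => c == ch) with
      | some i => start + i
      | none => t.length := by
  intro n
  induction n with
  | zero =>
    intro start hn hs
    have hse : start = t.length := by omega
    rw [checkScan]
    simp [hse]
  | succ n ihn =>
    intro start hn hs
    have hlt : start < t.length := by omega
    have hdrop : t.drop start = t[start] :: t.drop (start + 1) := List.drop_eq_getElem_cons hlt
    rw [hdrop, List.findIdx?_cons]
    by_cases hc : t[start] = ch
    · have : (t[start] == ch) = true := by simp [hc]
      rw [this]
      rw [checkScan]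
      simp [hlt, hc]
    · have hcc : (t[start] == ch) = false := by simp [hc]
      rw [hcc]
      simp only [Bool.false_eq_true, if_false]
      rw [checkScan]
      rw [dif_pos hlt, if_pos (by simpa using hc)]
      rw [ihn (start + 1) (by omega) (by omega)]
      cases hfi : (t.drop (start + 1)).findIdx? (fun c => c == ch) with
      | none => simp
      | some i =>
        simp
        ring

theorem findIdx?_lt_length {α : Type} (p : α → Bool) : ∀ (l : List α) (i : Nat),
    l.findIdx? p = some i → i < l.length := by
  intro l
  induction l with
  | nil => intro i h; simp at h
  | cons a l ih =>
    intro i h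
    rw [List.findIdx?_cons] at h
    split at h
    · simp only [List.length_cons, Option.some.injEq] at h ⊢
      omega
    · cases hfi : l.findIdx? p with
      | none => rw [hfi] at h; simp at h
      | some i' =>
        rw [hfi] at h
        simp only [Option.map_some, Option.some.injEq] at h
        have hi' := ih i' hfi
        simp only [List.length_cons]
        omega

-- find? at a sorted boundary returns the element at the boundary index
theorem find?_of_boundary (pb : Int → Bool) : ∀ (lst : List Int) (r : Nat), r ≤ lst.length →
    (∀ i (h : i < lst.length), i < r → pb lst[i] = false) →
    (∀ (h : r < lst.length), pb lst[r] = true) →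
    lst.find? pb = lst[r]? := by
  intro lst
  induction lst with
  | nil =>
    intro r hr _ _
    have hr0 : r = 0 := by simpa using hr
    subst hr0
    simp
  | cons a l ih =>
    intro r hr hbefore hat
    cases r with
    | zero =>
      have := hat (by simp)
      simp only [List.find?_cons, List.getElem_cons_zero] at this ⊢
      rw [this]
      simp
    | succ r' =>
      have h0 : pb a = false := by
        have := hbefore 0 (by simp) (by omega)
        simpa using this
      simp only [List.find?_cons, h0]
      rw [ih r' (by simpa using hr)
        (fun i h hi => by
          have := hbefore (i + 1) (by simpa using h) (by omega)
          simpa using this)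
        (fun h => by
          have := hat (by simpa using h)
          simpa using this)]
      simp

-- B's binary search lands exactly at the boundary of (· > j) in a strictly increasing list
theorem bsearch_spec (lst : List Int) (j : Int) (hsorted : lst.Pairwise (· < ·)) :
    ∀ (n lo hi : Nat), hi - lo ≤ n → lo ≤ hi → hi ≤ lst.length →
    (∀ i (h : i < lst.length), i < lo → lst[i] ≤ j) →
    (∀ i (h : i < lst.length), hi ≤ i → j < lst[i]) →
    (∀ i (h : i < lst.length), i < bsearch lst j lo hi → lst[i] ≤ j) ∧
      bsearch lst j lo hi ≤ lst.length ∧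
      (bsearch lst j lo hi < lst.length → j < lst[bsearch lst j lo hi]?.getD 0) := by
  have hmono : ∀ (i i' : Nat) (h : i < lst.length) (h' : i' < lst.length), i ≤ i' → lst[i] ≤ lst[i'] := by
    intro i i' h h' hle
    rcases Nat.lt_or_ge i i' with hlt | hge
    · exact le_of_lt (List.pairwise_iff_getElem.mp hsorted i i' h h' hlt)
    · have : i = i' := by omega
      subst this; rfl
  intro n
  induction n with
  | zero =>
    intro lo hi hn hlohi hhi hlow hhigh
    have he : lo = hi := by omega
    rw [bsearch, dif_neg (by omega)]
    refine ⟨fun i h hi' => hlow i h hi', by omega, fun h => ?_⟩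
    rw [List.getElem?_eq_getElem h]
    exact hhigh lo h (by omega)
  | succ n ihn =>
    intro lo hi hn hlohi hhi hlow hhigh
    by_cases hlt : lo < hi
    case neg =>
      rw [bsearch, dif_neg hlt]
      refine ⟨fun i h hi' => hlow i h hi', by omega, fun h => ?_⟩
      rw [List.getElem?_eq_getElem h]
      exact hhigh lo h (by omega)
    rw [bsearch, dif_pos hlt]
    have hmid1 : lo ≤ (lo + hi) / 2 := by omega
    have hmid2 : (lo + hi) / 2 < hi := by omega
    have hmlen : (lo + hi) / 2 < lst.length := by omega
    have hgetd : lst[(lo + hi) / 2]?.getD 0 = lst[(lo + hi) / 2] := by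
      rw [List.getElem?_eq_getElem hmlen]; rfl
    simp only [hgetd]
    by_cases hcmp : j < lst[(lo + hi) / 2]
    · rw [if_pos hcmp]
      exact ihn lo ((lo + hi) / 2) (by omega) (by omega) (by omega) hlow
        (fun i h hi' => lt_of_lt_of_le hcmp (hmono _ i hmlen h hi'))
    · rw [if_neg hcmp]
      exact ihn ((lo + hi) / 2 + 1) hi (by omega) (by omega) hhi
        (fun i h hi' => le_trans (hmono i _ h hmlen (by omega)) (by omega))
        hhigh

-- the two loops agree: A's scan pointer 'start' corresponds to B's last matched position 'start - 1'
theorem loop_eq (t : List Char) (pos : PySem.Dict Char (List Int))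
    (hpos : ∀ ch, pos.get? ch = if posOf t ch 0 = [] then none else some (posOf t ch 0)) :
    ∀ (ps : List Char) (start : Nat), start ≤ t.length →
    checkLoop t ps start = altLoop pos ps ((start : Int) - 1) := by
  intro ps
  induction ps with
  | nil => intro start _; rfl
  | cons ch rest ih =>
    intro start hs
    have htoNat : ((start : Int) - 1 + 1 - 0).toNat = start := by omega
    have hfind : (posOf t ch 0).find? (fun x => decide ((start : Int) - 1 < x))
        = Option.map (fun (i : Nat) => (0 : Int) + (start : Int) + (i : Int))
            ((t.drop start).findIdx? (fun c => c == ch)) := by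
      have := posOf_find? ch ((start : Int) - 1) t 0
      rw [htoNat] at this
      exact this
    have hscan := checkScan_eq t ch (t.length - start) start rfl hs
    simp only [checkLoop, altLoop]
    rw [hpos ch]
    by_cases hnil : posOf t ch 0 = []
    · -- ch never occurs among the kept characters: both return false
      rw [if_pos hnil]
      rw [hnil] at hfind
      simp only [List.find?_nil] at hfind
      have hfi : (t.drop start).findIdx? (fun c => c == ch) = none := by
        cases hfi : (t.drop start).findIdx? (fun c => c == ch)
        · rfl
        · rw [hfi] at hfind; simp at hfind
      rw [hfi] at hscan
      simp [hscan]
    · rw [if_neg hnil]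
      simp only [Option.elim_some]
      have hsorted := posOf_pairwise t ch 0
      obtain ⟨hbelow, hle, hat⟩ := bsearch_spec (posOf t ch 0) ((start : Int) - 1) hsorted
        ((posOf t ch 0).length) 0 (posOf t ch 0).length (by omega) (by omega) (le_refl _)
        (fun i h hi => by omega) (fun i h hi => by omega)
      set r := bsearch (posOf t ch 0) ((start : Int) - 1) 0 (posOf t ch 0).length with hr
      have hfb : (posOf t ch 0).find? (fun x => decide ((start : Int) - 1 < x)) = (posOf t ch 0)[r]? := by
        apply find?_of_boundary _ _ r hle
        · intro i h hi
          have := hbelow i h hi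
          simp; omega
        · intro h
          have := hat h
          rw [List.getElem?_eq_getElem h, Option.getD_some] at this
          simp; omega
      by_cases hrlen : r = (posOf t ch 0).length
      · -- no kept position of ch after the last match: both return false
        rw [if_pos hrlen]
        have : (posOf t ch 0)[r]? = none := by rw [List.getElem?_eq_none_iff]; omega
        rw [this] at hfb
        rw [hfb] at hfind
        have hfi : (t.drop start).findIdx? (fun c => c == ch) = none := by
          cases hfi : (t.drop start).findIdx? (fun c => c == ch)
          · rfl
          · rw [hfi] at hfind; simp at hfind
        rw [hfi] at hscan
        simp [hscan]
      · rw [if_neg hrlen]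
        have hrlt : r < (posOf t ch 0).length := by omega
        have : (posOf t ch 0)[r]? = some (posOf t ch 0)[r] := List.getElem?_eq_getElem hrlt
        rw [this] at hfb
        rw [hfb] at hfind
        cases hfi : (t.drop start).findIdx? (fun c => c == ch) with
        | none => rw [hfi] at hfind; simp at hfind
        | some i =>
          rw [hfi] at hfind
          simp only [Option.map_some, Option.some.injEq] at hfind
          have hilt : i < (t.drop start).length := findIdx?_lt_length _ _ i hfi
          have hdlen : (t.drop start).length = t.length - start := List.length_drop
          have hscanv : checkScan t ch start = start + i := by rw [hscan, hfi]
          have hne : ¬ checkScan t ch start = t.length := by omega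
          rw [if_neg hne]
          rw [this, Option.getD_some]
          have hval : (posOf t ch 0)[r] = (start : Int) + (i : Int) := by
            rw [hfind]; ring
          rw [hval]
          have hcast : ((start : Int) + (i : Int)) = (((start + i + 1 : Nat) : Int) - 1) := by
            push_cast; ring
          rw [hcast, ← ih (start + i + 1) (by omega), hscanv]

theorem check_spec : Claim_equal_check := by
  unfold Claim_equal_check
  intro s p removable k _
  unfold Spec_check check check_alt
  simp only []
  rw [foldl_skip]
  set t : List Char := ((PySem.List.enumerate s.toList 0).filter
      (fun ich => !(PySem.Set.contains (PySem.Set.ofList (PySem.List.slice removable none (some k))) ich.1))).map (·.2) with ht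
  have hpos : ∀ ch,
      ((t.foldl (fun st c => (st.1.insert c (st.1.getD c [] ++ [st.2]), st.2 + 1))
        ((PySem.Dict.empty : PySem.Dict Char (List Int)), (0 : Int))).1).get? ch
      = if posOf t ch 0 = [] then none else some (posOf t ch 0) := by
    intro ch
    rw [build_get? t ch PySem.Dict.empty 0]
    simp [PySem.Dict.get?_empty, PySem.Dict.getD_empty]
  have := loop_eq t _ hpos p.toList 0 (by omega)
  simpa using this
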